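-- pv_equiv track=rewrite | github.com/happyOBO/happyOBO.github.io | assets/code_box/pg_level2_jaden.py | solution
-- ===== SOURCE A (Python) =====
-- def solution(s):
--     answer = ''
--     list_s = list(s)
--     for i in range(len(list_s)):
--         if(i == 0 or list_s[i-1] == ' '):
--             if(97 <= ord(list_s[i]) <= 122):
--                 list_s[i] = chr(ord(list_s[i]) -32)
--         elif(list_s[i-1] != ' ' and 65 <= ord(list_s[i]) <= 90):
--             list_s[i] = chr(ord(list_s[i]) +32)
--
--     answer = ''.join(list_s)
--
--     return answer
-- ===== SOURCE B (Python) =====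
-- def solution(s):
--     def transform(word):
--         if not word:
--             return ''
--         first = word[0]
--         head = chr(ord(first) - 32) if 'a' <= first <= 'z' else first
--         tail = [chr(ord(c) + 32) if 'A' <= c <= 'Z' else c for c in word[1:]]
--         return head + ''.join(tail)
--     return ' '.join(transform(w) for w in s.split(' '))
-- ===== Notes on version B (the rewrite author's own statement) =====
-- stated objective: alternative
-- what changed: Replaces the index loop that mutates a char list in place while peeking at the previous cell with a split-on-space / per-word-transform / join pipeline: each word's first char is uppercased if ASCII lowercase, the rest lowercased if ASCII uppercase, empty words preserved.
import Mathlib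
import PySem

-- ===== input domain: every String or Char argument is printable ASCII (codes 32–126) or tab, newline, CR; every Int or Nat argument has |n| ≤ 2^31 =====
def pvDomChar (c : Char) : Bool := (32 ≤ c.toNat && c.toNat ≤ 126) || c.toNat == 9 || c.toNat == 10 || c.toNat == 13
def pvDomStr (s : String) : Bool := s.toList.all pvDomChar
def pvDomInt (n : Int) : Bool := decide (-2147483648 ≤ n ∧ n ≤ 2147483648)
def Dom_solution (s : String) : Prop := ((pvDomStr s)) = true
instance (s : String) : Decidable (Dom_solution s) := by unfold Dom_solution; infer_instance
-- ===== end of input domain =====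

-- B rewrites A's in-place index loop (mutate list_s[i] while peeking at list_s[i-1]) as a
-- split-on-space / transform-each-word / join pipeline; same cost, different decomposition.

-- ===== PORT A =====
-- one iteration of A's `for i in range(len(list_s))` body; indices read are always in range,
-- so the reads `list_s[i]` / `list_s[i-1]` are ported as getD (the default is never used)
def solutionStep (l : List Char) (i : Nat) : List Char :=
  if i = 0 ∨ l.getD (i-1) ' ' = ' ' then
    if 97 ≤ (l.getD i ' ').toNat ∧ (l.getD i ' ').toNat ≤ 122 then
      l.set i (Char.ofNat ((l.getD i ' ').toNat - 32))
    else l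
  else if l.getD (i-1) ' ' ≠ ' ' ∧ 65 ≤ (l.getD i ' ').toNat ∧ (l.getD i ' ').toNat ≤ 90 then
    l.set i (Char.ofNat ((l.getD i ' ').toNat + 32))
  else l

def solution (s : String) : String :=
  let list_s := s.toList
  String.mk ((List.range list_s.length).foldl solutionStep list_s)

-- ===== PORT B =====
-- `chr(ord(first) - 32) if 'a' <= first <= 'z' else first`
def trFirst (c : Char) : Char := if 'a' ≤ c ∧ c ≤ 'z' then Char.ofNat (c.toNat - 32) else c
-- `chr(ord(c) + 32) if 'A' <= c <= 'Z' else c`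
def trRest (c : Char) : Char := if 'A' ≤ c ∧ c ≤ 'Z' then Char.ofNat (c.toNat + 32) else c

-- B's `transform(word)`
def transformWord : List Char → List Char
  | [] => []
  | c :: rest => trFirst c :: rest.map trRest

-- `s.split(' ')` (single-char separator, empty pieces kept; hand-ported recursion)
def splitSp : List Char → List (List Char)
  | [] => [[]]
  | c :: rest =>
    if c = ' ' then [] :: splitSp rest
    else match splitSp rest with
      | [] => [[c]]          -- unreachable: splitSp never returns []
      | w :: ws => (c :: w) :: ws

-- `' '.join(parts)`
def joinSp : List (List Char) → List Char
  | [] => []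
  | [w] => w
  | w :: ws => w ++ ' ' :: joinSp ws

def solution_alt (s : String) : String :=
  String.mk (joinSp ((splitSp s.toList).map transformWord))

-- ===== PRECONDITION & SPEC =====
def Spec_solution (s : String) (out : String) : Prop := out = solution_alt s
instance (s : String) (out : String) : Decidable (Spec_solution s out) := by unfold Spec_solution; infer_instance

-- ===== CLAIM (what is proved, stated in full; the proofs are below) =====
def Claim_equal_solution : Prop := ∀ (s : String), Dom_solution s → Spec_solution s (solution s)

-- ===== LEMMAS AND PROOFS =====

-- the common intermediate form: one left-to-right pass carrying "previous char was a space / start"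
def goA (start : Bool) : List Char → List Char
  | [] => []
  | c :: rest => (if start then trFirst c else trRest c) :: goA (c == ' ') rest

theorem char_le_iff (a b : Char) : a ≤ b ↔ a.toNat ≤ b.toNat := by
  rw [Char.le_def, UInt32.le_iff_toNat_le]; rfl

theorem toNat_ofNat_small (n : Nat) (h : n < 1000) : (Char.ofNat n).toNat = n := by
  rw [Char.toNat_ofNat, if_pos (Or.inl (by omega))]

theorem trFirst_eq (c : Char) :
    trFirst c = if 97 ≤ c.toNat ∧ c.toNat ≤ 122 then Char.ofNat (c.toNat - 32) else c := by
  simp only [trFirst, char_le_iff]; rfl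

theorem trRest_eq (c : Char) :
    trRest c = if 65 ≤ c.toNat ∧ c.toNat ≤ 90 then Char.ofNat (c.toNat + 32) else c := by
  simp only [trRest, char_le_iff]; rfl

theorem char_eq_iff_toNat (a b : Char) : a = b ↔ a.toNat = b.toNat := by
  constructor
  · intro h; rw [h]
  · intro h; exact Char.eq_of_val_eq (by exact UInt32.toNat_inj.mp h)

theorem trFirst_space (c : Char) : (trFirst c = ' ') ↔ (c = ' ') := by
  rw [trFirst_eq]
  split_ifs with h
  · rw [char_eq_iff_toNat, char_eq_iff_toNat, toNat_ofNat_small _ (by omega)]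
    constructor <;> intro hh <;> [skip; skip] <;> simp_all <;> omega
  · rfl

theorem trRest_space (c : Char) : (trRest c = ' ') ↔ (c = ' ') := by
  rw [trRest_eq]
  split_ifs with h
  · rw [char_eq_iff_toNat, char_eq_iff_toNat, toNat_ofNat_small _ (by omega)]
    constructor <;> intro hh <;> simp_all <;> omega
  · rfl

theorem set_append_cons (pre : List Char) (x c : Char) (rest : List Char) :
    (pre ++ c :: rest).set pre.length x = pre ++ x :: rest := by
  induction pre with
  | nil => rfl
  | cons p ps ih => simp [List.set, ih]

theorem getD_append_len (pre : List Char) (c : Char) (rest : List Char) :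
    (pre ++ c :: rest).getD pre.length ' ' = c := by
  simp [List.getD, List.getElem?_append_right (Nat.le_refl _)]

theorem getD_append_last (pre : List Char) (suf : List Char) (h : pre ≠ []) :
    (pre ++ suf).getD (pre.length - 1) ' ' = pre.getLastD ' ' := by
  cases pre with
  | nil => exact absurd rfl h
  | cons a as =>
    rw [List.getD, List.getElem?_append_left (by simp), List.getLastD_eq_getLast?,
      List.getLast?_eq_getElem?]

-- evaluate one step of A's loop at index pre.length
theorem step_eval (pre : List Char) (c : Char) (rest : List Char) :
    solutionStep (pre ++ c :: rest) pre.length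
      = pre ++ (if pre.getLastD ' ' == ' ' then trFirst c else trRest c) :: rest := by
  by_cases hpre : pre = []
  · subst hpre
    simp only [List.nil_append, List.length_nil]
    rw [solutionStep, if_pos (Or.inl rfl)]
    show (if 97 ≤ c.toNat ∧ c.toNat ≤ 122
        then (c :: rest).set 0 (Char.ofNat (c.toNat - 32)) else c :: rest)
      = trFirst c :: rest
    rw [trFirst_eq]
    split_ifs with h
    · rfl
    · rfl
  · have hprev : (pre ++ c :: rest).getD (pre.length - 1) ' ' = pre.getLastD ' ' :=
      getD_append_last pre (c :: rest) hpre
    have hcur : (pre ++ c :: rest).getD pre.length ' ' = c := getD_append_len pre c rest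
    have hlen0 : pre.length ≠ 0 := by simpa using hpre
    by_cases hsp : pre.getLastD ' ' = ' '
    · rw [solutionStep, if_pos (Or.inr (by rw [hprev, hsp])), hcur]
      have hrhs : (pre.getLastD ' ' == ' ') = true := beq_iff_eq.mpr hsp
      rw [hrhs, if_pos rfl, trFirst_eq]
      split_ifs with h
      · exact set_append_cons pre _ c rest
      · rfl
    · have houter : ¬ (pre.length = 0 ∨ (pre ++ c :: rest).getD (pre.length - 1) ' ' = ' ') := by
        intro hor
        rcases hor with h0 | hsp'
        · exact hlen0 h0
        · rw [hprev] at hsp'; exact hsp hsp'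
      rw [solutionStep, if_neg houter, hprev, hcur]
      have hrhs : (pre.getLastD ' ' == ' ') = false := beq_eq_false_iff_ne.mpr hsp
      rw [hrhs, if_neg Bool.false_ne_true, trRest_eq]
      split_ifs with h1 h2
      all_goals first
        | exact set_append_cons pre _ c rest
        | rfl
        | tauto

theorem tr_space_beq (b : Bool) (c : Char) :
    (((if b then trFirst c else trRest c) : Char) == ' ') = (c == ' ') := by
  cases b <;> simp [trFirst_space, trRest_space]

theorem foldA (suf : List Char) : ∀ (pre : List Char),
    (List.range' pre.length suf.length).foldl solutionStep (pre ++ suf)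
      = pre ++ goA (pre.getLastD ' ' == ' ') suf := by
  induction suf with
  | nil => intro pre; simp [goA]
  | cons c rest ih =>
    intro pre
    rw [List.length_cons, List.range'_succ, List.foldl_cons, step_eval]
    have h2 := ih (pre ++ [if pre.getLastD ' ' == ' ' then trFirst c else trRest c])
    simp only [List.length_append, List.length_cons, List.length_nil, Nat.add_zero,
      List.append_assoc, List.cons_append, List.nil_append, List.getLastD_concat] at h2
    rw [Nat.add_comm pre.length 1] at h2 ⊢
    rw [h2, tr_space_beq]
    simp [goA]

theorem solution_eq_goA (s : String) :
    solution s = String.mk (goA true s.toList) := by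
  have h := foldA s.toList []
  simp only [List.length_nil, List.nil_append, List.getLastD, beq_self_eq_true] at h
  rw [solution, List.range_eq_range', h]

theorem joinSp_cons (x : List Char) (xs : List (List Char)) :
    joinSp (x :: xs) = x ++ (if xs.isEmpty then [] else ' ' :: joinSp xs) := by
  cases xs <;> simp [joinSp]

theorem splitSp_ne_nil (l : List Char) : splitSp l ≠ [] := by
  cases l with
  | nil => simp [splitSp]
  | cons c rest =>
    rw [splitSp]
    split_ifs
    · simp
    · cases h : splitSp rest <;> simp

theorem B_eq_goA (l : List Char) :
    joinSp ((splitSp l).map transformWord) = goA true l ∧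
    (∀ w ws, splitSp l = w :: ws →
      w.map trRest ++ (if ws.isEmpty then [] else ' ' :: joinSp (ws.map transformWord))
        = goA false l) := by
  induction l with
  | nil =>
    refine ⟨by simp [splitSp, transformWord, joinSp, goA], ?_⟩
    intro w ws h
    simp only [splitSp, List.cons.injEq] at h
    obtain ⟨rfl, rfl⟩ := h
    simp [goA]
  | cons c rest ih =>
    obtain ⟨ih1, ih2⟩ := ih
    by_cases hc : c = ' '
    · subst hc
      have hsplit : splitSp (' ' :: rest) = [] :: splitSp rest := by rw [splitSp]; simp
      have hne : (splitSp rest).isEmpty ≠ true := by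
        simp [List.isEmpty_iff, splitSp_ne_nil rest]
      have hgt : goA true (' ' :: rest) = ' ' :: goA true rest := by
        simp [goA, trFirst_eq]
      have hgf : goA false (' ' :: rest) = ' ' :: goA true rest := by
        simp [goA, trRest_eq]
      constructor
      · rw [hsplit, List.map_cons, joinSp_cons, hgt]
        simp only [transformWord, List.nil_append, List.isEmpty_map]
        rw [if_neg hne, ih1]
      · intro w ws h
        rw [hsplit] at h
        injection h with h1 h2
        subst h1; subst h2
        rw [hgf, ← ih1]
        simp only [List.map_nil, List.nil_append]
        rw [if_neg hne]
    · obtain ⟨w0, ws0, hsplit0⟩ : ∃ w ws, splitSp rest = w :: ws := by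
        cases h : splitSp rest with
        | nil => exact absurd h (splitSp_ne_nil rest)
        | cons a b => exact ⟨a, b, rfl⟩
      have hsplit : splitSp (c :: rest) = (c :: w0) :: ws0 := by
        rw [splitSp, if_neg hc, hsplit0]
      have hmid := ih2 w0 ws0 hsplit0
      have hcsp : (c == ' ') = false := by simp [hc]
      constructor
      · rw [hsplit, List.map_cons, joinSp_cons]
        have hgt : goA true (c :: rest) = trFirst c :: goA false rest := by
          simp [goA, hcsp]
        rw [hgt, ← hmid, transformWord, List.cons_append, List.isEmpty_map]
      · intro w ws h
        rw [hsplit] at h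
        injection h with h1 h2
        subst h1; subst h2
        have hgf : goA false (c :: rest) = trRest c :: goA false rest := by
          simp [goA, hcsp]
        rw [hgf, ← hmid, List.map_cons, List.cons_append]

theorem solution_alt_eq_goA (s : String) :
    solution_alt s = String.mk (goA true s.toList) := by
  rw [solution_alt, (B_eq_goA s.toList).1]

-- ===== VERDICT (by name: the statement is the Claim_ definition above) =====
theorem solution_spec : Claim_equal_solution := by
  intro s _
  unfold Spec_solution
  rw [solution_eq_goA, solution_alt_eq_goA]
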